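-- pv_equiv track=rewrite | github.com/ml-jku/UPT | data_generation/MeshGenerator.py | pair_neighboring_elements_internal
-- ===== SOURCE A (Python) =====
-- def pair_neighboring_elements_internal(line_type):
--     paired_list = []
--
--     point_tag = 5
--
--     for lt in line_type[:-1]:
--         if lt == 1:
--             paired_list.append([point_tag,point_tag+1])
--
--             point_tag += 1
--
--         elif lt == 2:
--             paired_list.append([point_tag,point_tag+1,point_tag+2])
--             point_tag += 2
--
--     if line_type[-1] == 1:
--         paired_list.append([point_tag,5])
--     elif line_type[-1] == 2:
--         paired_list.append([point_tag,point_tag+1,5])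
--
--
--     return paired_list
-- ===== SOURCE B (Python) =====
-- def pair_neighboring_elements_internal(line_type):
--     # pass 1: per-element tag increments and prefix-sum start tags (starting at 5)
--     inc = [1 if lt == 1 else 2 if lt == 2 else 0 for lt in line_type]
--     starts = [5]
--     for d in inc:
--         starts.append(starts[-1] + d)
--     # pass 2: emit the pair/triple for every non-final element from its start tag
--     out = []
--     for lt, s in zip(line_type[:-1], starts):
--         if lt == 1:
--             out.append([s, s + 1])
--         elif lt == 2:
--             out.append([s, s + 1, s + 2])
--     # closing element wraps around to tag 5
--     last = line_type[-1]
--     tag = starts[-2]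
--     if last == 1:
--         out.append([tag, 5])
--     elif last == 2:
--         out.append([tag, tag + 1, 5])
--     return out
-- ===== Notes on version B (the rewrite author's own statement) =====
-- stated objective: alternative
-- what changed: A's single stateful loop (running point_tag mutated while appending) is split into a prefix-sum pass that precomputes all start tags and a separate zip pass that emits the pairs/triples, with the closing tag read off the prefix-sum list.
import Mathlib
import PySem

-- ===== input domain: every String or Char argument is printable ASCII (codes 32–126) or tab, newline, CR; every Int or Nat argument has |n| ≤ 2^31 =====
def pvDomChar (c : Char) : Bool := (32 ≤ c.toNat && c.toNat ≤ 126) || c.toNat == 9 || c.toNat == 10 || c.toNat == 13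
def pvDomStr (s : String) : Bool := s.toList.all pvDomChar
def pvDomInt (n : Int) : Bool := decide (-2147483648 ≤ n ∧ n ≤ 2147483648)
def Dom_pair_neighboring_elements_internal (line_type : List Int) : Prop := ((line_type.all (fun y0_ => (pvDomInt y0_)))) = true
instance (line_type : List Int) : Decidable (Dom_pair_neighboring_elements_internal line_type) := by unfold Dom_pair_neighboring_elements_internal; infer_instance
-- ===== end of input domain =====

-- B replaces A's single stateful loop by a prefix-sum pass that precomputes every start tag,
-- plus a separate zip pass that emits the pairs/triples (objective: alternative decomposition, same cost).

-- ===== PORT A =====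
-- the loop body of A: branch on lt, append to paired_list and bump point_tag
def pneStepA (st : List (List Int) × Int) (lt : Int) : List (List Int) × Int :=
  if lt = 1 then (st.1 ++ [[st.2, st.2 + 1]], st.2 + 1)
  else if lt = 2 then (st.1 ++ [[st.2, st.2 + 1, st.2 + 2]], st.2 + 2)
  else st

def pair_neighboring_elements_internal (line_type : List Int) : List (List Int) :=
  let st := (PySem.List.slice line_type none (some (-1))).foldl pneStepA ([], 5)
  match PySem.List.pyGet? line_type (-1) with                      -- line_type[-1]; none = IndexError, excluded by Pre_
  | none => st.1
  | some last =>
      if last = 1 then st.1 ++ [[st.2, 5]]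
      else if last = 2 then st.1 ++ [[st.2, st.2 + 1, 5]]
      else st.1

-- ===== PORT B =====
-- Source B's increment of one element
def pneInc (lt : Int) : Int := if lt = 1 then 1 else if lt = 2 then 2 else 0

-- Source B's starts-building loop body: starts.append(starts[-1] + d)
def pneExtend (acc : List Int) (d : Int) : List Int := acc ++ [acc.getLast! + d]

-- Source B's emit loop body over zip(line_type[:-1], starts)
def pneEmit (acc : List (List Int)) (p : Int × Int) : List (List Int) :=
  if p.1 = 1 then acc ++ [[p.2, p.2 + 1]]
  else if p.1 = 2 then acc ++ [[p.2, p.2 + 1, p.2 + 2]]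
  else acc

def pair_neighboring_elements_internal_alt (line_type : List Int) : List (List Int) :=
  let inc := line_type.map pneInc
  let starts := inc.foldl pneExtend [5]
  let out := ((PySem.List.slice line_type none (some (-1))).zip starts).foldl pneEmit []
  match PySem.List.pyGet? line_type (-1), PySem.List.pyGet? starts (-2) with  -- last, tag; none = IndexError, excluded by Pre_
  | some last, some tag =>
      if last = 1 then out ++ [[tag, 5]]
      else if last = 2 then out ++ [[tag, tag + 1, 5]]
      else out
  | _, _ => out

-- ===== PRECONDITION & SPEC =====
-- Python A raises IndexError on line_type == [] (line_type[-1]); B raises there too.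
def Pre_pair_neighboring_elements_internal (line_type : List Int) : Prop := line_type ≠ []
instance (line_type : List Int) : Decidable (Pre_pair_neighboring_elements_internal line_type) := by unfold Pre_pair_neighboring_elements_internal; infer_instance
def pvWitness_pair_neighboring_elements_internal : List Int := [1, 2, 0, 1]

def Spec_pair_neighboring_elements_internal (line_type : List Int) (out : List (List Int)) : Prop := out = pair_neighboring_elements_internal_alt line_type
instance (line_type : List Int) (out : List (List Int)) : Decidable (Spec_pair_neighboring_elements_internal line_type out) := by unfold Spec_pair_neighboring_elements_internal; infer_instance

-- ===== CLAIM (what is proved, stated in full; the proofs are below) =====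
def Claim_equal_pair_neighboring_elements_internal : Prop := ∀ (line_type : List Int), Dom_pair_neighboring_elements_internal line_type → Pre_pair_neighboring_elements_internal line_type → Spec_pair_neighboring_elements_internal line_type (pair_neighboring_elements_internal line_type)

-- ===== LEMMAS AND PROOFS =====

-- the common semantics: the blocks emitted for a prefix starting at tag t
def pneBuild : List Int → Int → List (List Int)
  | [], _ => []
  | lt :: rest, t =>
      (if lt = 1 then [[t, t + 1]] else if lt = 2 then [[t, t + 1, t + 2]] else [])
        ++ pneBuild rest (t + pneInc lt)

-- running tags after each element, starting from t (exclusive of t itself)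
def pneScan : Int → List Int → List Int
  | _, [] => []
  | t, d :: ds => (t + d) :: pneScan (t + d) ds

theorem pneScan_length (t : Int) (ds : List Int) : (pneScan t ds).length = ds.length := by
  induction ds generalizing t with
  | nil => rfl
  | cons d ds ih => simp [pneScan, ih]

theorem pneScan_append (t : Int) (ds es : List Int) :
    pneScan t (ds ++ es) = pneScan t ds ++ pneScan (t + ds.sum) es := by
  induction ds generalizing t with
  | nil => simp [pneScan]
  | cons d ds ih =>
      simp [pneScan, ih, add_assoc]

theorem pneScan_get (ds : List Int) (t : Int) (k : Nat) (hk : k ≤ ds.length) :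
    (t :: pneScan t ds)[k]? = some (t + (ds.take k).sum) := by
  induction ds generalizing t k with
  | nil =>
      have : k = 0 := Nat.le_zero.mp hk
      subst this; simp
  | cons d ds ih =>
      cases k with
      | zero => simp
      | succ k =>
          have := ih (t + d) k (by simpa using hk)
          simpa [pneScan, add_assoc] using this

theorem pneFoldA (xs : List Int) (acc : List (List Int)) (t : Int) :
    xs.foldl pneStepA (acc, t) = (acc ++ pneBuild xs t, t + (xs.map pneInc).sum) := by
  induction xs generalizing acc t with
  | nil => simp [pneBuild]
  | cons lt xs ih =>
      simp only [List.foldl_cons, List.map_cons, List.sum_cons, pneStepA, pneBuild, pneInc]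
      split_ifs with h1 h2 <;> simp [ih, add_assoc]

theorem pneFoldStarts (ds : List Int) (acc : List Int) (t : Int) :
    ds.foldl pneExtend (acc ++ [t]) = acc ++ [t] ++ pneScan t ds := by
  induction ds generalizing acc t with
  | nil => simp [pneScan]
  | cons d ds ih =>
      have hlast : (acc ++ [t]).getLast! = t := by
        simp [List.getLast!_eq_getLast?_getD]
      have : pneExtend (acc ++ [t]) d = (acc ++ [t]) ++ [t + d] := by
        rw [pneExtend, hlast]
      simp only [List.foldl_cons, this, pneScan]
      have := ih (acc ++ [t]) (t + d)
      simpa [List.append_assoc] using this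

theorem pneFoldZip (xs : List Int) (t : Int) (ys : List Int) (acc : List (List Int))
    (h : ∃ zs, ys = pneScan t (xs.map pneInc) ++ zs) :
    ((xs.zip (t :: ys)).foldl pneEmit acc) = acc ++ pneBuild xs t := by
  induction xs generalizing t ys acc with
  | nil => simp [pneBuild]
  | cons lt xs ih =>
      obtain ⟨zs, hys⟩ := h
      simp only [List.map_cons, pneScan] at hys
      subst hys
      simp only [List.cons_append, List.zip_cons_cons, List.foldl_cons]
      have step : pneEmit acc (lt, t)
          = acc ++ (if lt = 1 then [[t, t + 1]] else if lt = 2 then [[t, t + 1, t + 2]] else []) := by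
        simp [pneEmit]; split_ifs <;> simp
      rw [step]
      have h2 := ih (t + pneInc lt) (pneScan (t + pneInc lt) (xs.map pneInc) ++ zs)
        (acc ++ (if lt = 1 then [[t, t + 1]] else if lt = 2 then [[t, t + 1, t + 2]] else []))
        ⟨zs, rfl⟩
      rw [h2]
      simp [pneBuild, List.append_assoc]

-- ===== VERDICT (by name: the statement is the Claim_ definition above) =====
theorem pair_neighboring_elements_internal_spec : Claim_equal_pair_neighboring_elements_internal := by
  intro line_type _ hpre
  have hne : line_type ≠ [] := hpre
  obtain ⟨xs, l, rfl⟩ : ∃ xs l, line_type = xs ++ [l] := by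
    rcases List.eq_nil_or_concat line_type with h | ⟨xs, l, h⟩
    · exact absurd h hne
    · exact ⟨xs, l, by simpa [List.concat_eq_append] using h⟩
  show pair_neighboring_elements_internal (xs ++ [l]) = pair_neighboring_elements_internal_alt (xs ++ [l])
  -- shared pieces
  set T : Int := 5 + (xs.map pneInc).sum with hT
  have hslice : PySem.List.slice (xs ++ [l]) none (some (-1)) = xs := by
    rw [PySem.List.slice_to_neg_one]; simp
  have hlastget : PySem.List.pyGet? (xs ++ [l]) (-1) = some l :=
    PySem.List.pyGet?_neg_one_append_singleton xs l
  -- A's fold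
  have hA : (PySem.List.slice (xs ++ [l]) none (some (-1))).foldl pneStepA ([], 5)
      = (pneBuild xs 5, T) := by
    rw [hslice, pneFoldA]; simp [hT]
  -- B's starts
  have hstarts : ((xs ++ [l]).map pneInc).foldl pneExtend [5]
      = [5] ++ pneScan 5 ((xs ++ [l]).map pneInc) := by
    simpa using pneFoldStarts ((xs ++ [l]).map pneInc) [] 5
  -- B's tag lookup: starts[-2] = T
  have hlen : ([5] ++ pneScan 5 ((xs ++ [l]).map pneInc)).length = xs.length + 2 := by
    simp [pneScan_length]
  have htag : PySem.List.pyGet? ([5] ++ pneScan 5 ((xs ++ [l]).map pneInc)) (-2) = some T := by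
    rw [PySem.List.pyGet?_neg_ofNat _ 2 (by omega) (by omega)]
    have h1 : ([5] ++ pneScan 5 ((xs ++ [l]).map pneInc)).length - 2 = xs.length := by omega
    rw [h1]
    have h2 := pneScan_get ((xs ++ [l]).map pneInc) 5 xs.length (by simp)
    have h3 : (((xs ++ [l]).map pneInc).take xs.length) = xs.map pneInc := by
      simp
    simpa [h3, hT] using h2
  -- B's zip fold
  have hzip : ((PySem.List.slice (xs ++ [l]) none (some (-1))).zip
        ([5] ++ pneScan 5 ((xs ++ [l]).map pneInc))).foldl pneEmit []
      = pneBuild xs 5 := by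
    rw [hslice]
    have := pneFoldZip xs 5 (pneScan 5 ((xs ++ [l]).map pneInc)) []
      ⟨pneScan T [pneInc l], by rw [List.map_append, pneScan_append]; simp [hT]⟩
    simpa using this
  -- assemble
  unfold pair_neighboring_elements_internal pair_neighboring_elements_internal_alt
  simp only [hA, hstarts, hlastget, htag, hzip]
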